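-- pv_equiv track=rewrite | github.com/LMN1590/Kakurasu_Nonogram_Heuristic_Solver | Nonogram/AnnealingNonogram.py | calCost
-- ===== SOURCE A (Python) =====
-- def calCost(table,row,col):
--     cost = 0
--
--     curRow=[]
--     for i in row:
--         curRow.append(list(i))
--     curCol=[]
--     for i in col:
--         curCol.append(list(i))
--     #Array to check whether the previous index is black or white. False for white and True for black
--     lastCheckedRow=[False for i in range(len(table))]
--     lastCheckedCol=[False for i in range(len(table))]
--
--     for indexRow in range(len(table)):
--         for indexCol in range(len(table)):
--             if(table[indexRow][indexCol]==1):
--                 #If current index is black while the constraint of either the row or column is zero, the cost will rise by 1 and the other(column/row) will be unaffected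
--
--                 curRow[indexCol][0]-=1
--                 curCol[indexRow][0]-=1
--                 #If the current line of the row or/and the column is smaller than 0, it will be add to the cost/errors
--                 if(curRow[indexCol][0]<0): cost+=1
--                 if(curCol[indexRow][0]<0): cost+=1
--
--                 lastCheckedRow[indexRow]=True
--                 lastCheckedCol[indexCol]=True
--
--             else:
--                 #If there is still remaining black tiles in a line but it is cut off by a white tile, cost/errors will increase
--                 if(len(curRow[indexCol])>0 and lastCheckedCol[indexCol]):
--                     if(curRow[indexCol][0]>0):
--                         cost+=1
--                         curRow[indexCol][0]-=1
--                     else: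
--                         del curRow[indexCol][0]
--                 lastCheckedCol[indexCol]=False
--                 if(len(curCol[indexRow])>0 and lastCheckedRow[indexRow]):
--                     if(curCol[indexRow][0]>0):
--                         cost+=1
--                         curCol[indexRow][0]-=1
--                     else:
--                         del curCol[indexRow][0]
--                 lastCheckedRow[indexRow]=False
--             if(len(curRow[indexCol])==0):
--                 curRow[indexCol].append(0)
--             if(len(curCol[indexRow])==0):
--                 curCol[indexRow].append(0)
--         #The remaining uncounted lines in a row will be added to the cost/errors
--         for num in curCol[indexRow]:
--             if(num>0): cost+=num
--
--     #The remaining uncounted lines in all columns will be added to the cost/errors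
--     for indexCol in range(len(table)):
--         for num in curRow[indexCol]:
--             if(num>0): cost+=num
--     return cost
-- ===== SOURCE B (Python) =====
-- def lineCost(cells, constraint):
--     # replay the per-line state machine of the nonogram cost on one line
--     cons = list(constraint)
--     cost = 0
--     last = False
--     for c in cells:
--         if c == 1:
--             cons[0] -= 1
--             if cons[0] < 0:
--                 cost += 1
--             last = True
--         else:
--             if len(cons) > 0 and last:
--                 if cons[0] > 0:
--                     cost += 1
--                     cons[0] -= 1
--                 else:
--                     del cons[0]
--             last = False
--         if len(cons) == 0:
--             cons.append(0)
--     return cost + sum(x for x in cons if x > 0)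
--
--
-- def calCost(table, row, col):
--     n = len(table)
--     return sum(lineCost([table[i][j] for i in range(n)], row[j]) for j in range(n)) \
--          + sum(lineCost([table[i][j] for j in range(n)], col[i]) for i in range(n))
-- ===== Notes on version B (the rewrite author's own statement) =====
-- stated objective: simpler
-- what changed: B replaces A's interleaved double loop over shared mutable per-line state arrays (curRow/curCol/lastCheckedRow/lastCheckedCol) by one shared per-line helper lineCost that replays the state machine on a single line, summed independently over the n columns and n rows.
import Mathlib
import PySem

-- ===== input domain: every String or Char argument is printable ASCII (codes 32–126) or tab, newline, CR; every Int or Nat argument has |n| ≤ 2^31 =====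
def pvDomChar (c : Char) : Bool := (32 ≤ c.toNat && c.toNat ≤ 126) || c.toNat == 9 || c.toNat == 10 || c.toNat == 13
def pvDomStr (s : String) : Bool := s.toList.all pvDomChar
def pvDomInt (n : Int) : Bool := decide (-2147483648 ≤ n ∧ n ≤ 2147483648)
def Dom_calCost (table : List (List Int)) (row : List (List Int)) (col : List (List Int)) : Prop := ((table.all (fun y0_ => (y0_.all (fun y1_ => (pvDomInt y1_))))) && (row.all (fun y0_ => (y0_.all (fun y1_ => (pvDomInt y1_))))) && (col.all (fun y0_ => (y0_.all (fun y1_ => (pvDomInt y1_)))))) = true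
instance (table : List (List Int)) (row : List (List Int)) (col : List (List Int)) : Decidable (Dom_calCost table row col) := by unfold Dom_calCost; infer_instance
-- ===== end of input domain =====

-- B re-decomposes A's interleaved nested loop into one per-line helper applied to each column and each
-- row independently (objective: simpler). Return-value equivalence only: A mutates nothing observable.

-- ===== PORT A =====
-- shared low-level helpers for both ports: `lst[0] -= 1` and in-range item assignment
def decHead : List Int → List Int
  | [] => []
  | a :: t => (a - 1) :: t

def pvSet {α : Type} (xs : List α) (i : Int) (a : α) : List α :=
  if 0 ≤ i then xs.set i.toNat a else xs

-- the body of A's inner loop (per cell), acting on the state (cost, curRow, curCol, lastCheckedRow, lastCheckedCol)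
def pvInner (table : List (List Int)) (indexRow : Int)
    (st : Int × List (List Int) × List (List Int) × List Bool × List Bool) (indexCol : Int) :
    Int × List (List Int) × List (List Int) × List Bool × List Bool :=
  match st with
  | (cost, curRow, curCol, lastRow, lastCol) =>
    let st' :=
      if PySem.List.pyGetD (PySem.List.pyGetD table indexRow []) indexCol 0 == 1 then
        let curRow := pvSet curRow indexCol (decHead (PySem.List.pyGetD curRow indexCol []))
        let curCol := pvSet curCol indexRow (decHead (PySem.List.pyGetD curCol indexRow []))
        let cost := cost + (if PySem.List.pyGetD (PySem.List.pyGetD curRow indexCol []) 0 0 < 0 then 1 else 0)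
        let cost := cost + (if PySem.List.pyGetD (PySem.List.pyGetD curCol indexRow []) 0 0 < 0 then 1 else 0)
        let lastRow := pvSet lastRow indexRow true
        let lastCol := pvSet lastCol indexCol true
        (cost, curRow, curCol, lastRow, lastCol)
      else
        let p :=
          if 0 < (PySem.List.pyGetD curRow indexCol []).length ∧ PySem.List.pyGetD lastCol indexCol false = true then
            if 0 < PySem.List.pyGetD (PySem.List.pyGetD curRow indexCol []) 0 0 then
              (cost + 1, pvSet curRow indexCol (decHead (PySem.List.pyGetD curRow indexCol [])))
            else
              (cost, pvSet curRow indexCol (PySem.List.pyGetD curRow indexCol []).tail)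
          else (cost, curRow)
        let cost := p.1
        let curRow := p.2
        let lastCol := pvSet lastCol indexCol false
        let q :=
          if 0 < (PySem.List.pyGetD curCol indexRow []).length ∧ PySem.List.pyGetD lastRow indexRow false = true then
            if 0 < PySem.List.pyGetD (PySem.List.pyGetD curCol indexRow []) 0 0 then
              (cost + 1, pvSet curCol indexRow (decHead (PySem.List.pyGetD curCol indexRow [])))
            else
              (cost, pvSet curCol indexRow (PySem.List.pyGetD curCol indexRow []).tail)
          else (cost, curCol)
        let cost := q.1
        let curCol := q.2
        let lastRow := pvSet lastRow indexRow false
        (cost, curRow, curCol, lastRow, lastCol)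
    match st' with
    | (cost, curRow, curCol, lastRow, lastCol) =>
      let curRow := if (PySem.List.pyGetD curRow indexCol []).length == 0 then
          pvSet curRow indexCol (PySem.List.pyGetD curRow indexCol [] ++ [0]) else curRow
      let curCol := if (PySem.List.pyGetD curCol indexRow []).length == 0 then
          pvSet curCol indexRow (PySem.List.pyGetD curCol indexRow [] ++ [0]) else curCol
      (cost, curRow, curCol, lastRow, lastCol)

-- the body of A's outer loop: the inner loop plus the end-of-row sum of remaining positive entries
def pvOuter (table : List (List Int))
    (st : Int × List (List Int) × List (List Int) × List Bool × List Bool) (indexRow : Int) :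
    Int × List (List Int) × List (List Int) × List Bool × List Bool :=
  let n : Int := table.length
  let st := (PySem.List.pyRange 0 n 1).foldl (fun s j => pvInner table indexRow s j) st
  match st with
  | (cost, curRow, curCol, lastRow, lastCol) =>
    let cost := (PySem.List.pyGetD curCol indexRow []).foldl
        (fun c num => c + (if 0 < num then num else 0)) cost
    (cost, curRow, curCol, lastRow, lastCol)

def calCost (table : List (List Int)) (row : List (List Int)) (col : List (List Int)) : Int :=
  let n : Int := table.length
  let curRow : List (List Int) := row.foldl (fun acc i => acc ++ [i]) []
  let curCol : List (List Int) := col.foldl (fun acc i => acc ++ [i]) []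
  let lastCheckedRow : List Bool := (PySem.List.pyRange 0 n 1).map (fun _ => false)
  let lastCheckedCol : List Bool := (PySem.List.pyRange 0 n 1).map (fun _ => false)
  let st := (PySem.List.pyRange 0 n 1).foldl (pvOuter table)
      (0, curRow, curCol, lastCheckedRow, lastCheckedCol)
  (PySem.List.pyRange 0 n 1).foldl
    (fun cost indexCol => (PySem.List.pyGetD st.2.1 indexCol []).foldl
        (fun c num => c + (if 0 < num then num else 0)) cost) st.1

-- ===== PORT B =====
-- one step of lineCost's loop over the cells of a single line, state (cons, last, cost)
def lineStep (s : List Int × Bool × Int) (c : Int) : List Int × Bool × Int :=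
  match s with
  | (cons, last, cost) =>
    let s' :=
      if c == 1 then
        let cons := decHead cons
        (cons, true, cost + (if PySem.List.pyGetD cons 0 0 < 0 then 1 else 0))
      else
        let p :=
          if 0 < cons.length ∧ last = true then
            if 0 < PySem.List.pyGetD cons 0 0 then (cost + 1, decHead cons)
            else (cost, cons.tail)
          else (cost, cons)
        (p.2, false, p.1)
    if s'.1.length == 0 then ([0], s'.2.1, s'.2.2) else s'

def sumPos (xs : List Int) : Int :=
  xs.foldl (fun acc x => acc + (if 0 < x then x else 0)) 0

def lineCost (cells : List Int) (constraint : List Int) : Int :=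
  let s := cells.foldl lineStep (constraint, false, 0)
  s.2.2 + sumPos s.1

def calCost_alt (table : List (List Int)) (row : List (List Int)) (col : List (List Int)) : Int :=
  let n : Int := table.length
  ((PySem.List.pyRange 0 n 1).foldl (fun acc j =>
      acc + lineCost ((PySem.List.pyRange 0 n 1).map
              (fun i => PySem.List.pyGetD (PySem.List.pyGetD table i []) j 0))
            (PySem.List.pyGetD row j [])) 0)
  + ((PySem.List.pyRange 0 n 1).foldl (fun acc i =>
      acc + lineCost ((PySem.List.pyRange 0 n 1).map
              (fun j => PySem.List.pyGetD (PySem.List.pyGetD table i []) j 0))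
            (PySem.List.pyGetD col i [])) 0)

-- ===== PRECONDITION & SPEC =====
-- Pre_ excludes exactly the inputs on which Python A raises an IndexError: row/col or a table row
-- shorter than len(table), or an empty constraint list whose line starts with a black cell.
def Pre_calCost (table : List (List Int)) (row : List (List Int)) (col : List (List Int)) : Prop :=
  table.length ≤ row.length ∧ table.length ≤ col.length ∧
  (∀ t ∈ table, table.length ≤ t.length) ∧
  (∀ j, j < table.length → row.getD j [] = [] → (table.getD 0 []).getD j 0 ≠ 1) ∧
  (∀ i, i < table.length → col.getD i [] = [] → (table.getD i []).getD 0 0 ≠ 1)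
instance (table : List (List Int)) (row : List (List Int)) (col : List (List Int)) : Decidable (Pre_calCost table row col) := by unfold Pre_calCost; infer_instance

def pvWitness_calCost : List (List Int) × List (List Int) × List (List Int) :=
  ([[1, 0], [0, 1]], [[1], [1]], [[1], [1]])

def Spec_calCost (table : List (List Int)) (row : List (List Int)) (col : List (List Int)) (out : Int) : Prop := out = calCost_alt table row col
instance (table : List (List Int)) (row : List (List Int)) (col : List (List Int)) (out : Int) : Decidable (Spec_calCost table row col out) := by unfold Spec_calCost; infer_instance

-- ===== CLAIM (what is proved, stated in full; the proofs are below) =====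
def Claim_equal_calCost : Prop := ∀ (table : List (List Int)) (row : List (List Int)) (col : List (List Int)), Dom_calCost table row col → Pre_calCost table row col → Spec_calCost table row col (calCost table row col)

-- ===== LEMMAS AND PROOFS =====

-- generic list-update facts used to track A's mutable state arrays
theorem pv_getD_set_self {a : Type} (L : List a) (i : Nat) (h : i < L.length) (x d : a) :
    (L.set i x).getD i d = x := by
  simp [List.getD_eq_getElem?_getD, List.getElem?_set_self h]

theorem pv_getD_set_ne {a : Type} (L : List a) {i j : Nat} (h : i ≠ j) (x d : a) :
    (L.set i x).getD j d = L.getD j d := by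
  simp [List.getD_eq_getElem?_getD, List.getElem?_set_ne h]

theorem pv_set_getD_self {a : Type} (L : List a) (i : Nat) (h : i < L.length) (d : a) :
    L.set i (L.getD i d) = L := by
  rw [List.getD_eq_getElem _ _ h]; exact List.set_getElem_self h

theorem pv_length_foldl_set {a : Type} (idxs : List Nat) (f : Nat → a) (L : List a) :
    (idxs.foldl (fun M k => M.set k (f k)) L).length = L.length := by
  induction idxs generalizing L with
  | nil => rfl
  | cons k ks ih => rw [List.foldl_cons, ih, List.length_set]

theorem pv_getD_foldl_set_notin {a : Type} (idxs : List Nat) (f : Nat → a) (j : Nat) (d : a)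
    (h : j ∉ idxs) (L : List a) :
    (idxs.foldl (fun M k => M.set k (f k)) L).getD j d = L.getD j d := by
  induction idxs generalizing L with
  | nil => rfl
  | cons k ks ih =>
      rw [List.foldl_cons, ih (fun hm => h (List.mem_cons_of_mem _ hm)),
        pv_getD_set_ne L (fun he => h (by rw [he]; exact List.mem_cons_self)) (f k) d]

theorem pv_getD_foldl_set_mem {a : Type} (idxs : List Nat) (f : Nat → a) (j : Nat) (d : a)
    (hn : idxs.Nodup) (hm : j ∈ idxs) (L : List a) (hl : j < L.length) :
    (idxs.foldl (fun M k => M.set k (f k)) L).getD j d = f j := by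
  induction idxs generalizing L with
  | nil => cases hm
  | cons k ks ih =>
      rw [List.foldl_cons]
      rcases List.mem_cons.mp hm with he | hm'
      · subst he
        rw [pv_getD_foldl_set_notin ks f j d (List.nodup_cons.mp hn).1, pv_getD_set_self L j hl]
      · exact ih (List.nodup_cons.mp hn).2 hm' _ (by simpa [List.length_set] using hl)

theorem pv_getD_map_const {a b : Type} (L : List a) (j : Nat) (x : b) :
    (L.map (fun _ => x)).getD j x = x := by
  rw [List.getD_eq_getElem?_getD, List.getElem?_map]
  rcases L[j]? with _ | y <;> rfl

theorem pv_pyRangeN (N : Nat) :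
    PySem.List.pyRange 0 (N : Int) 1 = (List.range' 0 N).map (fun (k : Nat) => ((k : Int))) := by
  rw [PySem.List.pyRange_one]
  simp [List.range_eq_range', List.map_eq_flatMap]

-- the cost component of lineStep is additive in the incoming cost; cons and last ignore it
theorem lineStep_shift (cons : List Int) (last : Bool) (c x : Int) :
    lineStep (cons, last, c) x =
      ((lineStep (cons, last, 0) x).1, (lineStep (cons, last, 0) x).2.1,
        c + (lineStep (cons, last, 0) x).2.2) := by
  simp only [lineStep]
  split_ifs <;> simp_all

theorem foldl_lineStep_shift (xs : List Int) : ∀ (cons : List Int) (last : Bool) (c : Int),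
    xs.foldl lineStep (cons, last, c) =
      ((xs.foldl lineStep (cons, last, 0)).1, (xs.foldl lineStep (cons, last, 0)).2.1,
        c + (xs.foldl lineStep (cons, last, 0)).2.2) := by
  induction xs with
  | nil => intro cons last c; simp
  | cons x xs ih =>
      intro cons last c
      rw [List.foldl_cons, List.foldl_cons, lineStep_shift]
      rcases h : lineStep (cons, last, 0) x with ⟨t1, t2, t3⟩
      rw [ih t1 t2 (c + t3), ih t1 t2 t3]
      simp; ring

theorem foldl_pos_eq (xs : List Int) (c : Int) :
    xs.foldl (fun acc x => acc + (if 0 < x then x else 0)) c = c + sumPos xs := by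
  rw [PySem.List.foldl_add xs (fun x => if 0 < x then x else 0) c]
  rw [sumPos, PySem.List.foldl_add xs (fun x => if 0 < x then x else 0) 0, zero_add]

-- the value of cell (i, j) of the grid, and the per-line machines of the decomposition
def cellv (table : List (List Int)) (i j : Nat) : Int := (table.getD i []).getD j 0

def colRun (table row : List (List Int)) (j i : Nat) : List Int × Bool × Int :=
  ((List.range' 0 i).map (fun i' => cellv table i' j)).foldl lineStep (row.getD j [], false, 0)

def rowRun (table col : List (List Int)) (N i : Nat) : List Int × Bool × Int :=
  ((List.range' 0 N).map (fun j => cellv table i j)).foldl lineStep (col.getD i [], false, 0)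

theorem colRun_succ (table row : List (List Int)) (j i : Nat) :
    colRun table row j (i + 1) = lineStep (colRun table row j i) (cellv table i j) := by
  unfold colRun
  rw [List.range'_concat]
  simp

-- one cell of A's inner loop acts as one lineStep on the column-j machine and one on the row-i machine
theorem pvSet_natCast {a : Type} (xs : List a) (k : Nat) (x : a) : pvSet xs (↑k) x = xs.set k x := by
  simp [pvSet]

theorem pv_tail_nil {a : Type} {l : List a} (h : l.length - 1 = 0) : l.tail = [] :=
  List.eq_nil_of_length_eq_zero (by rw [List.length_tail]; exact h)

set_option maxHeartbeats 4000000 in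
theorem inner_cell (table CR CC : List (List Int)) (LR LC : List Bool) (cost : Int) (i j : Nat)
    (hj1 : j < CR.length) (hj2 : j < LC.length) (hi1 : i < CC.length) (hi2 : i < LR.length) :
    pvInner table (↑i) (cost, CR, CC, LR, LC) (↑j) =
      (cost + (lineStep (CR.getD j [], LC.getD j false, 0) (cellv table i j)).2.2
            + (lineStep (CC.getD i [], LR.getD i false, 0) (cellv table i j)).2.2,
       CR.set j (lineStep (CR.getD j [], LC.getD j false, 0) (cellv table i j)).1,
       CC.set i (lineStep (CC.getD i [], LR.getD i false, 0) (cellv table i j)).1,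
       LR.set i (lineStep (CC.getD i [], LR.getD i false, 0) (cellv table i j)).2.1,
       LC.set j (lineStep (CR.getD j [], LC.getD j false, 0) (cellv table i j)).2.1) := by
  simp only [pvInner, pvSet_natCast, PySem.List.pyGetD_natCast, cellv,
    pv_getD_set_self CR j hj1, pv_getD_set_self CC i hi1]
  generalize hCR : CR.getD j [] = CRj
  generalize hCC : CC.getD i [] = CCi
  generalize hLC : LC.getD j false = LCb
  generalize hLR : LR.getD i false = LRb
  generalize (table.getD i []).getD j 0 = c
  have hsetCR : CR.set j CRj = CR := by rw [← hCR]; exact pv_set_getD_self CR j hj1 []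
  have hsetCC : CC.set i CCi = CC := by rw [← hCC]; exact pv_set_getD_self CC i hi1 []
  have hsetLC : LC.set j LCb = LC := by rw [← hLC]; exact pv_set_getD_self LC j hj2 false
  have hsetLR : LR.set i LRb = LR := by rw [← hLR]; exact pv_set_getD_self LR i hi2 false
  simp only [lineStep]
  split_ifs <;> simp_all [List.length_eq_zero_iff, pv_tail_nil]

theorem foldl_lineStep_shift' (xs : List Int) (s : List Int × Bool × Int) :
    xs.foldl lineStep s =
      ((xs.foldl lineStep (s.1, s.2.1, 0)).1, (xs.foldl lineStep (s.1, s.2.1, 0)).2.1,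
        s.2.2 + (xs.foldl lineStep (s.1, s.2.1, 0)).2.2) := by
  rcases s with ⟨a, b, c⟩
  exact foldl_lineStep_shift xs a b c

set_option maxHeartbeats 4000000 in
theorem inner_seg (table : List (List Int)) (i : Nat) (m : Nat) :
    ∀ (k : Nat) (cost : Int) (CR CC : List (List Int)) (LR LC : List Bool),
    k + m ≤ CR.length → k + m ≤ LC.length → i < CC.length → i < LR.length →
    (List.range' k m).foldl (fun s (j : Nat) => pvInner table (↑i) s ((j : Int))) (cost, CR, CC, LR, LC)
    = (cost + ((List.range' k m).map (fun j =>
            (lineStep (CR.getD j [], LC.getD j false, 0) (cellv table i j)).2.2)).sum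
            + (((List.range' k m).map (fun j => cellv table i j)).foldl lineStep
                (CC.getD i [], LR.getD i false, 0)).2.2,
       (List.range' k m).foldl (fun L j =>
            L.set j (lineStep (CR.getD j [], LC.getD j false, 0) (cellv table i j)).1) CR,
       CC.set i (((List.range' k m).map (fun j => cellv table i j)).foldl lineStep
                (CC.getD i [], LR.getD i false, 0)).1,
       LR.set i (((List.range' k m).map (fun j => cellv table i j)).foldl lineStep
                (CC.getD i [], LR.getD i false, 0)).2.1,
       (List.range' k m).foldl (fun L j =>
            L.set j (lineStep (CR.getD j [], LC.getD j false, 0) (cellv table i j)).2.1) LC) := by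
  induction m with
  | zero =>
      intro k cost CR CC LR LC h1 h2 h3 h4
      simp only [List.range'_zero, List.map_nil, List.foldl_nil, List.sum_nil, Prod.mk.injEq]
      exact ⟨by ring, trivial, (pv_set_getD_self CC i h3 []).symm,
        (pv_set_getD_self LR i h4 false).symm, trivial⟩
  | succ m ih =>
      intro k cost CR CC LR LC h1 h2 h3 h4
      rw [List.range'_succ]
      simp only [List.foldl_cons, List.map_cons, List.sum_cons]
      rw [inner_cell table CR CC LR LC cost i k (by omega) (by omega) h3 h4,
        ih (k + 1) _ _ _ _ _ (by rw [List.length_set]; omega) (by rw [List.length_set]; omega)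
          (by rw [List.length_set]; exact h3) (by rw [List.length_set]; exact h4)]
      set A := lineStep (CR.getD k [], LC.getD k false, 0) (cellv table i k) with hA
      set B := lineStep (CC.getD i [], LR.getD i false, 0) (cellv table i k) with hB
      have hne : ∀ j ∈ List.range' (k + 1) m, k ≠ j := by
        intro j hj; have := (List.mem_range'_1.mp hj).1; omega
      have hCRg : ∀ j ∈ List.range' (k + 1) m, (CR.set k A.1).getD j [] = CR.getD j [] :=
        fun j hj => pv_getD_set_ne CR (hne j hj) _ _
      have hLCg : ∀ j ∈ List.range' (k + 1) m, (LC.set k A.2.1).getD j false = LC.getD j false :=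
        fun j hj => pv_getD_set_ne LC (hne j hj) _ _
      rw [pv_getD_set_self CC i h3 B.1 [], pv_getD_set_self LR i h4 B.2.1 false]
      rw [List.map_congr_left (l := List.range' (k + 1) m)
            (f := fun j => (lineStep ((CR.set k A.1).getD j [], (LC.set k A.2.1).getD j false, 0)
                (cellv table i j)).2.2)
            (g := fun j => (lineStep (CR.getD j [], LC.getD j false, 0) (cellv table i j)).2.2)
            (fun j hj => by simp only [hCRg j hj, hLCg j hj])]
      rw [PySem.List.foldl_congr_mem (List.range' (k + 1) m)
            (fun L j => L.set j (lineStep ((CR.set k A.1).getD j [], (LC.set k A.2.1).getD j false, 0)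
                (cellv table i j)).1)
            (fun L j => L.set j (lineStep (CR.getD j [], LC.getD j false, 0) (cellv table i j)).1)
            (CR.set k A.1) (fun L j hj => by simp only [hCRg j hj, hLCg j hj])]
      rw [PySem.List.foldl_congr_mem (List.range' (k + 1) m)
            (fun L j => L.set j (lineStep ((CR.set k A.1).getD j [], (LC.set k A.2.1).getD j false, 0)
                (cellv table i j)).2.1)
            (fun L j => L.set j (lineStep (CR.getD j [], LC.getD j false, 0) (cellv table i j)).2.1)
            (LC.set k A.2.1) (fun L j hj => by simp only [hCRg j hj, hLCg j hj])]
      rw [List.set_set, List.set_set,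
        foldl_lineStep_shift' ((List.range' (k + 1) m).map (fun j => cellv table i j)) B]
      simp only [Prod.mk.injEq, and_true]
      ring
theorem lineStep_fst (s : List Int × Bool × Int) (x : Int) :
    (lineStep s x).1 = (lineStep (s.1, s.2.1, 0) x).1 := by
  rcases s with ⟨a, b, c⟩; rw [lineStep_shift]

theorem lineStep_sndfst (s : List Int × Bool × Int) (x : Int) :
    (lineStep s x).2.1 = (lineStep (s.1, s.2.1, 0) x).2.1 := by
  rcases s with ⟨a, b, c⟩; rw [lineStep_shift]

theorem lineStep_cost (s : List Int × Bool × Int) (x : Int) :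
    (lineStep s x).2.2 = s.2.2 + (lineStep (s.1, s.2.1, 0) x).2.2 := by
  rcases s with ⟨a, b, c⟩; rw [lineStep_shift]

set_option maxHeartbeats 4000000 in
theorem outer_step (table : List (List Int)) (i : Nat) (cost : Int)
    (CR CC : List (List Int)) (LR LC : List Bool)
    (h1 : table.length ≤ CR.length) (h2 : table.length ≤ LC.length)
    (h3 : i < CC.length) (h4 : i < LR.length) :
    pvOuter table (cost, CR, CC, LR, LC) (↑i)
    = (cost + ((List.range' 0 table.length).map (fun j =>
            (lineStep (CR.getD j [], LC.getD j false, 0) (cellv table i j)).2.2)).sum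
            + (((List.range' 0 table.length).map (fun j => cellv table i j)).foldl lineStep
                (CC.getD i [], LR.getD i false, 0)).2.2
            + sumPos (((List.range' 0 table.length).map (fun j => cellv table i j)).foldl lineStep
                (CC.getD i [], LR.getD i false, 0)).1,
       (List.range' 0 table.length).foldl (fun L j =>
            L.set j (lineStep (CR.getD j [], LC.getD j false, 0) (cellv table i j)).1) CR,
       CC.set i (((List.range' 0 table.length).map (fun j => cellv table i j)).foldl lineStep
                (CC.getD i [], LR.getD i false, 0)).1,
       LR.set i (((List.range' 0 table.length).map (fun j => cellv table i j)).foldl lineStep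
                (CC.getD i [], LR.getD i false, 0)).2.1,
       (List.range' 0 table.length).foldl (fun L j =>
            L.set j (lineStep (CR.getD j [], LC.getD j false, 0) (cellv table i j)).2.1) LC) := by
  simp only [pvOuter, pv_pyRangeN, List.foldl_map]
  rw [inner_seg table i table.length 0 cost CR CC LR LC (by omega) (by omega) h3 h4]
  simp only [PySem.List.pyGetD_natCast]
  rw [pv_getD_set_self CC i h3 _ [], foldl_pos_eq]
  simp only [List.foldl_map]
set_option maxHeartbeats 16000000 in
theorem outer_seg (table row col : List (List Int)) (m : Nat) :
    ∀ (i : Nat) (cost : Int) (CR CC : List (List Int)) (LR LC : List Bool),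
    i + m = table.length →
    table.length ≤ CR.length → table.length ≤ LC.length →
    table.length ≤ CC.length → table.length ≤ LR.length →
    (∀ j, j < table.length → CR.getD j [] = (colRun table row j i).1) →
    (∀ j, j < table.length → LC.getD j false = (colRun table row j i).2.1) →
    (∀ i', i ≤ i' → i' < table.length → CC.getD i' [] = col.getD i' []) →
    (∀ i', i ≤ i' → i' < table.length → LR.getD i' false = false) →
    (((List.range' i m).foldl (fun s (i' : Nat) => pvOuter table s ((i' : Int))) (cost, CR, CC, LR, LC)).1
      = cost + ((List.range' i m).map (fun i' => (rowRun table col table.length i').2.2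
            + sumPos (rowRun table col table.length i').1)).sum
          + ((List.range' 0 table.length).map (fun j =>
                (colRun table row j table.length).2.2 - (colRun table row j i).2.2)).sum)
    ∧ (∀ j, j < table.length →
        ((List.range' i m).foldl (fun s (i' : Nat) => pvOuter table s ((i' : Int)))
            (cost, CR, CC, LR, LC)).2.1.getD j []
          = (colRun table row j table.length).1) := by
  induction m with
  | zero =>
      intro i cost CR CC LR LC hiN h1 h2 h3 h4 hcr hlc hcc hlr
      have hi : i = table.length := by omega
      subst hi
      simp only [List.range'_zero, List.foldl_nil, List.map_nil, List.sum_nil, add_zero]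
      exact ⟨by simp, hcr⟩
  | succ m ih =>
      intro i cost CR CC LR LC hiN h1 h2 h3 h4 hcr hlc hcc hlr
      have hiN' : i < table.length := by omega
      rw [List.range'_succ]
      simp only [List.foldl_cons]
      rw [outer_step table i cost CR CC LR LC h1 h2 (by omega) (by omega),
        hcc i le_rfl hiN', hlr i le_rfl hiN',
        show ((List.range' 0 table.length).map (fun j => cellv table i j)).foldl lineStep
            (col.getD i [], false, 0) = rowRun table col table.length i from rfl,
        List.map_congr_left (l := List.range' 0 table.length)
          (f := fun j => (lineStep (CR.getD j [], LC.getD j false, 0) (cellv table i j)).2.2)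
          (g := fun j => (colRun table row j (i + 1)).2.2 - (colRun table row j i).2.2)
          (fun j hj => by
            have hjN : j < table.length := by
              have := (List.mem_range'_1.mp hj).2; omega
            simp only [hcr j hjN, hlc j hjN]
            rw [colRun_succ, lineStep_cost (colRun table row j i) (cellv table i j)]
            ring)]
      have hcr' : ∀ j, j < table.length →
          ((List.range' 0 table.length).foldl (fun L j =>
              L.set j (lineStep (CR.getD j [], LC.getD j false, 0) (cellv table i j)).1) CR).getD j []
            = (colRun table row j (i + 1)).1 := by
        intro j hj
        rw [pv_getD_foldl_set_mem (List.range' 0 table.length) _ j []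
            (List.nodup_range' 1) (List.mem_range'_1.mpr ⟨Nat.zero_le j, by omega⟩) CR (by omega)]
        simp only [hcr j hj, hlc j hj]
        rw [colRun_succ]
        conv_rhs => rw [lineStep_fst]
      have hlc' : ∀ j, j < table.length →
          ((List.range' 0 table.length).foldl (fun L j =>
              L.set j (lineStep (CR.getD j [], LC.getD j false, 0) (cellv table i j)).2.1) LC).getD j false
            = (colRun table row j (i + 1)).2.1 := by
        intro j hj
        rw [pv_getD_foldl_set_mem (List.range' 0 table.length) _ j false
            (List.nodup_range' 1) (List.mem_range'_1.mpr ⟨Nat.zero_le j, by omega⟩) LC (by omega)]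
        simp only [hcr j hj, hlc j hj]
        rw [colRun_succ]
        conv_rhs => rw [lineStep_sndfst]
      have hcc' : ∀ i', i + 1 ≤ i' → i' < table.length →
          (CC.set i (rowRun table col table.length i).1).getD i' [] = col.getD i' [] := by
        intro i' hge hlt
        rw [pv_getD_set_ne CC (by omega) _ _, hcc i' (by omega) hlt]
      have hlr' : ∀ i', i + 1 ≤ i' → i' < table.length →
          (LR.set i (rowRun table col table.length i).2.1).getD i' false = false := by
        intro i' hge hlt
        rw [pv_getD_set_ne LR (by omega) _ _, hlr i' (by omega) hlt]
      obtain ⟨ihc, ihp⟩ := ih (i + 1)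
        (cost + ((List.range' 0 table.length).map (fun j =>
            (colRun table row j (i + 1)).2.2 - (colRun table row j i).2.2)).sum
          + (rowRun table col table.length i).2.2 + sumPos (rowRun table col table.length i).1)
        ((List.range' 0 table.length).foldl (fun L j =>
            L.set j (lineStep (CR.getD j [], LC.getD j false, 0) (cellv table i j)).1) CR)
        (CC.set i (rowRun table col table.length i).1)
        (LR.set i (rowRun table col table.length i).2.1)
        ((List.range' 0 table.length).foldl (fun L j =>
            L.set j (lineStep (CR.getD j [], LC.getD j false, 0) (cellv table i j)).2.1) LC)
        (by omega)
        (by rw [pv_length_foldl_set]; exact h1)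
        (by rw [pv_length_foldl_set]; exact h2)
        (by rw [List.length_set]; exact h3)
        (by rw [List.length_set]; exact h4)
        hcr' hlc' hcc' hlr'
      constructor
      · rw [ihc, List.map_cons, List.sum_cons]
        have hmerge : ((List.range' 0 table.length).map (fun j =>
              (colRun table row j (i + 1)).2.2 - (colRun table row j i).2.2)).sum
            + ((List.range' 0 table.length).map (fun j =>
              (colRun table row j table.length).2.2 - (colRun table row j (i + 1)).2.2)).sum
            = ((List.range' 0 table.length).map (fun j =>
              (colRun table row j table.length).2.2 - (colRun table row j i).2.2)).sum := by
          rw [← PySem.List.sum_map_add_int]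
          exact congrArg List.sum (List.map_congr_left (fun j _ => by ring))
        omega
      · exact ihp
theorem readout_sum (N : Nat) (L : List (List Int)) (a : Int) :
    (List.range' 0 N).foldl
        (fun x y => (L.getD y []).foldl (fun c num => c + if 0 < num then num else 0) x) a
      = a + ((List.range' 0 N).map (fun j => sumPos (L.getD j []))).sum := by
  rw [PySem.List.foldl_congr_mem (List.range' 0 N) _
      (fun x y => x + sumPos (L.getD y [])) a (fun acc y _ => foldl_pos_eq _ _),
    PySem.List.foldl_add]

-- ===== VERDICT (by name: the statement is the Claim_ definition above) =====
set_option maxHeartbeats 16000000 in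
theorem calCost_spec : Claim_equal_calCost := by
  unfold Claim_equal_calCost
  intro table row col _hdom hpre
  unfold Spec_calCost
  obtain ⟨hrow, hcol, _htab, -, -⟩ := hpre
  simp only [calCost, calCost_alt, pv_pyRangeN, List.foldl_map, List.map_map,
    PySem.List.foldl_append_singleton, List.nil_append, Function.comp_def,
    PySem.List.pyGetD_natCast]
  obtain ⟨hc, hp⟩ := outer_seg table row col table.length 0 0 row col
    ((List.range' 0 table.length).map (fun _ => false))
    ((List.range' 0 table.length).map (fun _ => false))
    (by omega) hrow
    (by rw [List.length_map, List.length_range']) hcol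
    (by rw [List.length_map, List.length_range'])
    (fun j _ => rfl)
    (fun j _ => (pv_getD_map_const _ j false).trans rfl)
    (fun i' _ _ => rfl)
    (fun i' _ _ => pv_getD_map_const _ i' false)
  set ST := (List.range' 0 table.length).foldl (fun s (i' : Nat) => pvOuter table s ((i' : Int)))
      (0, row, col, (List.range' 0 table.length).map (fun _ => false),
        (List.range' 0 table.length).map (fun _ => false)) with hST
  rw [readout_sum]
  have hq : ∀ j ∈ List.range' 0 table.length,
      sumPos (ST.2.1.getD j []) = sumPos ((colRun table row j table.length).1) := by
    intro j hj
    rw [hp j (by have := (List.mem_range'_1.mp hj).2; omega)]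
  rw [List.map_congr_left hq, hc]
  have h0 : ∀ j ∈ List.range' 0 table.length,
      (colRun table row j table.length).2.2 - (colRun table row j 0).2.2
        = (colRun table row j table.length).2.2 := fun j _ => by
    rw [show (colRun table row j 0).2.2 = 0 from rfl, sub_zero]
  rw [List.map_congr_left h0]
  rw [PySem.List.foldl_add, PySem.List.foldl_add]
  have hB1 : ∀ j ∈ List.range' 0 table.length,
      lineCost ((List.range' 0 table.length).map (fun x => (table.getD x []).getD j 0))
          (row.getD j [])
        = (colRun table row j table.length).2.2
          + sumPos (colRun table row j table.length).1 := fun j _ => rfl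
  have hB2 : ∀ i ∈ List.range' 0 table.length,
      lineCost ((List.range' 0 table.length).map (fun x => (table.getD i []).getD x 0))
          (col.getD i [])
        = (rowRun table col table.length i).2.2
          + sumPos (rowRun table col table.length i).1 := fun i _ => rfl
  rw [List.map_congr_left hB1, List.map_congr_left hB2,
    PySem.List.sum_map_add_int (List.range' 0 table.length)
      (fun j => (colRun table row j table.length).2.2)
      (fun j => sumPos (colRun table row j table.length).1)]
  omega
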